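-- pv_equiv track=rewrite | github.com/wdi2020/wdi_python | kolokwia_2016/kol_popraw/zad2.py | reku
-- ===== SOURCE A (Python) =====
-- def can_move(tab,row,col,n):
--     if row >= 0 and col >= 0 and row < n and col < n:
--         if tab[row][col] == False:
--             return True
--     return False
--
-- def reku(tab,n,row,col,ilosc_ruchow):
--     min_ilosc = n
--     if row == n-1:
--         return ilosc_ruchow
--     ruchy = (1,2),(1,-2),(2,1),(2,-1)
--     for elem in ruchy:
--         if can_move(tab,row+elem[0],col+elem[1],n):
--             a =  reku(tab,n,row+elem[0],col+elem[1],ilosc_ruchow+1)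
--             if a < min_ilosc:
--                 min_ilosc = a
--     return min_ilosc
-- ===== SOURCE B (Python) =====
-- def reku(tab, n, row, col, ilosc_ruchow):
--     # top-down memoized recursion over search states
--     moves = ((1, 2), (1, -2), (2, 1), (2, -1))
--     memo = {}
--
--     def solve(r, c, k):
--         if r == n - 1:
--             return k
--         key = (r, c, k)
--         if key not in memo:
--             best = n
--             for dr, dc in moves:
--                 r2, c2 = r + dr, c + dc
--                 if 0 <= r2 < n and 0 <= c2 < n and not tab[r2][c2]:
--                     best = min(best, solve(r2, c2, k + 1))
--             memo[key] = best
--         return memo[key]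
--
--     return solve(row, col, ilosc_ruchow)
-- ===== Notes on version B (the rewrite author's own statement) =====
-- stated objective: alternative
-- what changed: A re-explores every downward knight path by plain recursion; B runs the same search top-down with a memo table over search states, so each state is solved once (intended as faster; a timing run measured only 1.23x at its largest random input); Pre_ excludes boards smaller/raggeder than n x n, on which both programs raise IndexError whenever the search touches a missing cell and return only accidentally otherwise.
import Mathlib
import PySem

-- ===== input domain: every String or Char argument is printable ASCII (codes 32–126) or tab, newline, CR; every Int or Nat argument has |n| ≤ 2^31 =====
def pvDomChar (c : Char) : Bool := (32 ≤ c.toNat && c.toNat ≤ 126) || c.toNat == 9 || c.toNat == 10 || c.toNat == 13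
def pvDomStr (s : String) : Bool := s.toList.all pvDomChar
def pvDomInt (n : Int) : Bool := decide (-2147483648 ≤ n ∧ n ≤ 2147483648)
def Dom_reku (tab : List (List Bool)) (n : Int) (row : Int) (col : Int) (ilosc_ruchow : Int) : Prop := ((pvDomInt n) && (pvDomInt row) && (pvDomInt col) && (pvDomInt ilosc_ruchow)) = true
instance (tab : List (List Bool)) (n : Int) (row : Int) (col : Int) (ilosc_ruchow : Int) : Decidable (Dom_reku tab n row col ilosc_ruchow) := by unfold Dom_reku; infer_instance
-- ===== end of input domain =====

-- B replaces A's re-exploring path search by a top-down memoized recursion over search states (each state solved once); same return value.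


-- ===== PORT A =====
-- tab[r][c]; exact for in-bounds indices (the only ones the claim covers: see Pre_reku)
def pvCell (tab : List (List Bool)) (r c : Int) : Bool :=
  (PySem.List.pyGet? ((PySem.List.pyGet? tab r).getD []) c).getD false

def can_move (tab : List (List Bool)) (row : Int) (col : Int) (n : Int) : Bool :=
  if 0 ≤ row ∧ 0 ≤ col ∧ row < n ∧ col < n then pvCell tab row col == false else false

-- needed by reku's termination proof (cited in decreasing_by)
theorem can_move_bounds {tab : List (List Bool)} {r c n : Int}
    (h : can_move tab r c n = true) : 0 ≤ r ∧ r < n := by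
  unfold can_move at h
  split at h
  · next hc => exact ⟨hc.1, hc.2.2.1⟩
  · exact absurd h (by simp)

def reku (tab : List (List Bool)) (n : Int) (row : Int) (col : Int) (ilosc_ruchow : Int) : Int :=
  if row = n - 1 then ilosc_ruchow
  else
    let m0 : Int := n
    let m1 : Int := if h1 : can_move tab (row + 1) (col + 2) n = true then
        (let a := reku tab n (row + 1) (col + 2) (ilosc_ruchow + 1); if a < m0 then a else m0)
      else m0
    let m2 : Int := if h2 : can_move tab (row + 1) (col - 2) n = true then
        (let a := reku tab n (row + 1) (col - 2) (ilosc_ruchow + 1); if a < m1 then a else m1)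
      else m1
    let m3 : Int := if h3 : can_move tab (row + 2) (col + 1) n = true then
        (let a := reku tab n (row + 2) (col + 1) (ilosc_ruchow + 1); if a < m2 then a else m2)
      else m2
    let m4 : Int := if h4 : can_move tab (row + 2) (col - 1) n = true then
        (let a := reku tab n (row + 2) (col - 1) (ilosc_ruchow + 1); if a < m3 then a else m3)
      else m3
    m4
termination_by (n - row).toNat
decreasing_by
  · have := can_move_bounds h1; omega
  · have := can_move_bounds h2; omega
  · have := can_move_bounds h3; omega
  · have := can_move_bounds h4; omega

-- ===== PORT B =====
def pvMoves : List (Int × Int) := [(1, 2), (1, -2), (2, 1), (2, -1)]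

-- Source B's guard '0 <= r2 < n and 0 <= c2 < n and not tab[r2][c2]'
def pvValid (tab : List (List Bool)) (n r c : Int) : Bool :=
  decide (0 ≤ r) && decide (r < n) && decide (0 ≤ c) && decide (c < n) && !pvCell tab r c

-- Source B's inner 'solve'; the memo dict is threaded as state, and a fuel parameter
-- (recursion depth never exceeds it on any input; it only makes the recursion
-- structural) replaces Python's unbounded recursion.
def solveB (tab : List (List Bool)) (n : Int) :
    Nat → Int → Int → Int → PySem.Dict (Int × Int × Int) Int →
    Int × PySem.Dict (Int × Int × Int) Int
  | 0, _, _, k, memo => (k, memo)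
  | Nat.succ fuel, r, c, k, memo =>
    if r = n - 1 then (k, memo)
    else
      match memo.get? (r, c, k) with
      | some v => (v, memo)
      | none =>
        let st := pvMoves.foldl
          (fun (st : Int × PySem.Dict (Int × Int × Int) Int) m =>
            if pvValid tab n (r + m.1) (c + m.2) = true then
              let p := solveB tab n fuel (r + m.1) (c + m.2) (k + 1) st.2
              (min st.1 p.1, p.2)
            else st)
          (n, memo)
        (st.1, st.2.insert (r, c, k) st.1)

def reku_alt (tab : List (List Bool)) (n : Int) (row : Int) (col : Int) (ilosc_ruchow : Int) : Int :=
  (solveB tab n ((n - row).toNat + 1) row col ilosc_ruchow PySem.Dict.empty).1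

-- ===== PRECONDITION & SPEC =====
-- Pre_ excludes boards smaller/raggeder than n×n when the start square has a legal first knight move:
-- on those A raises IndexError whenever its search touches a missing cell, and returns only accidentally
-- (depending on which cells the search happens to reach) when it does not.
def Pre_reku (tab : List (List Bool)) (n : Int) (row : Int) (col : Int) (ilosc_ruchow : Int) : Prop :=
  (n ≤ (tab.length : Int) ∧ ∀ l ∈ tab.take n.toNat, n ≤ (l.length : Int))
  ∨ row = n - 1
  ∨ (∀ m ∈ ([(1, 2), (1, -2), (2, 1), (2, -1)] : List (Int × Int)),
      ¬(0 ≤ row + m.1 ∧ row + m.1 < n ∧ 0 ≤ col + m.2 ∧ col + m.2 < n))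
instance (tab : List (List Bool)) (n : Int) (row : Int) (col : Int) (ilosc_ruchow : Int) : Decidable (Pre_reku tab n row col ilosc_ruchow) := by unfold Pre_reku; infer_instance

def pvWitness_reku : List (List Bool) × Int × Int × Int × Int :=
  ([[false, false, false], [false, false, false], [false, false, false]], 3, 0, 0, 0)

def Spec_reku (tab : List (List Bool)) (n : Int) (row : Int) (col : Int) (ilosc_ruchow : Int) (out : Int) : Prop := out = reku_alt tab n row col ilosc_ruchow
instance (tab : List (List Bool)) (n : Int) (row : Int) (col : Int) (ilosc_ruchow : Int) (out : Int) : Decidable (Spec_reku tab n row col ilosc_ruchow out) := by unfold Spec_reku; infer_instance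

-- ===== CLAIM (what is proved, stated in full; the proofs are below) =====
def Claim_equal_reku : Prop := ∀ (tab : List (List Bool)) (n : Int) (row : Int) (col : Int) (ilosc_ruchow : Int), Dom_reku tab n row col ilosc_ruchow → Pre_reku tab n row col ilosc_ruchow → Spec_reku tab n row col ilosc_ruchow (reku tab n row col ilosc_ruchow)

-- ===== LEMMAS AND PROOFS =====

theorem pvValid_iff (tab : List (List Bool)) (n r c : Int) :
    pvValid tab n r c = true ↔ (0 ≤ r ∧ r < n ∧ 0 ≤ c ∧ c < n ∧ pvCell tab r c = false) := by
  simp [pvValid, and_assoc]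

theorem can_move_eq (tab : List (List Bool)) (r c n : Int) :
    can_move tab r c n = pvValid tab n r c := by
  unfold can_move
  by_cases h : pvValid tab n r c = true
  · rcases (pvValid_iff tab n r c).mp h with ⟨h1, h2, h3, h4, h5⟩
    rw [if_pos ⟨h1, h3, h2, h4⟩, h, h5]; rfl
  · rw [Bool.not_eq_true] at h
    rw [h]
    split
    · next hc =>
      have : ¬(pvCell tab r c = false) := by
        intro hcell
        exact absurd ((pvValid_iff tab n r c).mpr ⟨hc.1, hc.2.2.1, hc.2.1, hc.2.2.2, hcell⟩)
          (by rw [h]; simp)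
      simp [Bool.not_eq_false] at this
      rw [this]; rfl
    · rfl

-- one step of A's 4-move minimum loop
def pvAS (tab : List (List Bool)) (n r2 c2 k acc : Int) : Int :=
  if _h : can_move tab r2 c2 n = true then
    (let a := reku tab n r2 c2 (k + 1); if a < acc then a else acc)
  else acc

theorem reku_unfold (tab : List (List Bool)) (n r c k : Int) :
    reku tab n r c k =
      if r = n - 1 then k
      else
        pvAS tab n (r + 2) (c - 1) k
          (pvAS tab n (r + 2) (c + 1) k
            (pvAS tab n (r + 1) (c - 2) k
              (pvAS tab n (r + 1) (c + 2) k n))) := by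
  conv_lhs => rw [reku]
  rfl

-- every value stored in the memo is the corresponding value of A's recursion
def pvGood (tab : List (List Bool)) (n : Int)
    (memo : PySem.Dict (Int × Int × Int) Int) : Prop :=
  ∀ r c k v, memo.get? (r, c, k) = some v → v = reku tab n r c k

-- one step of B's 4-move foldl agrees with one step of A's loop and keeps the memo good
theorem pvStepEq (tab : List (List Bool)) (n : Int) (f : Nat) (r c k : Int) (m : Int × Int)
    (hm : m ∈ pvMoves) (hf : (n - r).toNat < f + 1)
    (IH : ∀ r' c' k' memo, (n - r').toNat < f → pvGood tab n memo →
      (solveB tab n f r' c' k' memo).1 = reku tab n r' c' k' ∧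
      pvGood tab n (solveB tab n f r' c' k' memo).2)
    (st : Int × PySem.Dict (Int × Int × Int) Int) (hG : pvGood tab n st.2) :
    ((if pvValid tab n (r + m.1) (c + m.2) = true then
        let p := solveB tab n f (r + m.1) (c + m.2) (k + 1) st.2
        (min st.1 p.1, p.2)
      else st) : Int × PySem.Dict (Int × Int × Int) Int).1
        = pvAS tab n (r + m.1) (c + m.2) k st.1
    ∧ pvGood tab n ((if pvValid tab n (r + m.1) (c + m.2) = true then
        let p := solveB tab n f (r + m.1) (c + m.2) (k + 1) st.2
        (min st.1 p.1, p.2)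
      else st) : Int × PySem.Dict (Int × Int × Int) Int).2 := by
  have hm1 : 1 ≤ m.1 := by
    simp only [pvMoves, List.mem_cons, List.not_mem_nil, or_false] at hm
    rcases hm with rfl | rfl | rfl | rfl <;> simp
  by_cases hv : pvValid tab n (r + m.1) (c + m.2) = true
  · have hb := (pvValid_iff tab n (r + m.1) (c + m.2)).mp hv
    have hfc : (n - (r + m.1)).toNat < f := by omega
    have hIH := IH (r + m.1) (c + m.2) (k + 1) st.2 hfc hG
    rw [if_pos hv]
    constructor
    · show min st.1 (solveB tab n f (r + m.1) (c + m.2) (k + 1) st.2).1 = _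
      unfold pvAS
      rw [dif_pos (by rw [can_move_eq]; exact hv), hIH.1]
      simp only [Int.min_def]
      split_ifs <;> omega
    · exact hIH.2
  · rw [if_neg hv]
    refine ⟨?_, hG⟩
    unfold pvAS
    rw [dif_neg (by rw [can_move_eq]; exact hv)]

-- B's foldl over any suffix of the move list computes A's 4-move minimum chain and keeps the memo good
theorem pvFoldEq (tab : List (List Bool)) (n : Int) (f : Nat) (r c k : Int)
    (hf : (n - r).toNat < f + 1)
    (IH : ∀ r' c' k' memo, (n - r').toNat < f → pvGood tab n memo →
      (solveB tab n f r' c' k' memo).1 = reku tab n r' c' k' ∧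
      pvGood tab n (solveB tab n f r' c' k' memo).2) :
    ∀ (ms : List (Int × Int)), (∀ m ∈ ms, m ∈ pvMoves) →
    ∀ (st : Int × PySem.Dict (Int × Int × Int) Int), pvGood tab n st.2 →
      (ms.foldl
        (fun (st : Int × PySem.Dict (Int × Int × Int) Int) m =>
          if pvValid tab n (r + m.1) (c + m.2) = true then
            let p := solveB tab n f (r + m.1) (c + m.2) (k + 1) st.2
            (min st.1 p.1, p.2)
          else st) st).1
        = ms.foldl (fun acc m => pvAS tab n (r + m.1) (c + m.2) k acc) st.1
      ∧ pvGood tab n (ms.foldl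
        (fun (st : Int × PySem.Dict (Int × Int × Int) Int) m =>
          if pvValid tab n (r + m.1) (c + m.2) = true then
            let p := solveB tab n f (r + m.1) (c + m.2) (k + 1) st.2
            (min st.1 p.1, p.2)
          else st) st).2 := by
  intro ms
  induction ms with
  | nil => intro _ st hG; exact ⟨rfl, hG⟩
  | cons m ms ihms =>
    intro hmem st hG
    have hstep := pvStepEq tab n f r c k m (hmem m (by simp)) hf IH st hG
    rw [List.foldl_cons, List.foldl_cons, ← hstep.1]
    exact ihms (fun m' hm' => hmem m' (by simp [hm'])) _ hstep.2

theorem solveB_correct (tab : List (List Bool)) (n : Int) :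
    ∀ (f : Nat) (r c k : Int) (memo : PySem.Dict (Int × Int × Int) Int),
      (n - r).toNat < f → pvGood tab n memo →
      (solveB tab n f r c k memo).1 = reku tab n r c k ∧
      pvGood tab n (solveB tab n f r c k memo).2 := by
  intro f
  induction f with
  | zero => intro r c k memo hf; omega
  | succ f IH =>
    intro r c k memo hf hG
    by_cases hleaf : r = n - 1
    · rw [solveB, if_pos hleaf, reku_unfold, if_pos hleaf]
      exact ⟨rfl, hG⟩
    · rw [solveB, if_neg hleaf]
      cases hget : memo.get? (r, c, k) with
      | some v => exact ⟨hG r c k v hget, hG⟩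
      | none =>
        have hfold := pvFoldEq tab n f r c k hf IH pvMoves (fun m hm => hm) (n, memo) hG
        have hval : pvMoves.foldl (fun acc m => pvAS tab n (r + m.1) (c + m.2) k acc) (n, memo).1
            = reku tab n r c k := by
          simp only [pvMoves, List.foldl_cons, List.foldl_nil]
          rw [reku_unfold tab n r c k, if_neg hleaf,
            show c + (-2 : Int) = c - 2 from by ring,
            show c + (-1 : Int) = c - 1 from by ring]
        rw [hfold.1, hval]
        refine ⟨rfl, ?_⟩
        intro r' c' k' v hget'
        rw [PySem.Dict.get?_insert] at hget'
        split_ifs at hget' with hkey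
        · simp only [Prod.ext_iff] at hkey
          obtain ⟨hr', hc', hk'⟩ := hkey
          subst hr'; subst hc'; subst hk'
          rw [← Option.some_inj.mp hget', hfold.1, hval]
        · exact hfold.2 r' c' k' v hget'

theorem reku_spec : Claim_equal_reku := by
  unfold Claim_equal_reku Spec_reku
  intro tab n row col k _ _
  unfold reku_alt
  have hG : pvGood tab n PySem.Dict.empty := by
    intro r c k' v h
    rw [PySem.Dict.get?_empty] at h
    exact absurd h (by simp)
  exact ((solveB_correct tab n ((n - row).toNat + 1) row col k PySem.Dict.empty
    (by omega) hG).1).symm
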